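-- pv_equiv track=rewrite | github.com/thekaigonzalez/TokenRec | tokenrec.py | dict_toks
-- ===== SOURCE A (Python) =====
-- toks = '! @ # $ % ^ & * ( ) < > ? . , ` / { } ; : - _ + \' "'
--
-- def dict_toks(tolex):
--     di = {}
--     buf  =""
--     for i in range(len(tolex)):
--         if (tolex[i] in toks.split()):
--             di[tolex[i]] = 'TOKEN'
--             di[buf.strip()] = tolex[i] + '_subtext'
--             buf = ""
--         else:
--             buf += tolex[i]
--     return di
-- ===== SOURCE B (Python) =====
-- toks = '! @ # $ % ^ & * ( ) < > ? . , ` / { } ; : - _ + \' "'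
--
-- def dict_toks(tolex):
--     seps = set(toks.split())
--     idxs = [i for i, c in enumerate(tolex) if c in seps]
--     di = {}
--     prev = 0
--     for i in idxs:
--         c = tolex[i]
--         di[c] = 'TOKEN'
--         di[tolex[prev:i].strip()] = c + '_subtext'
--         prev = i + 1
--     return di
-- ===== Notes on version B (the rewrite author's own statement) =====
-- stated objective: faster
-- what changed: Replaced A's per-character state machine that scans the 26-element token list and regrows a text buffer at every character with a two-pass decomposition: collect all delimiter positions via a set-membership comprehension over enumerate, then loop over those positions slicing the original string between consecutive delimiters.
import Mathlib
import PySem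

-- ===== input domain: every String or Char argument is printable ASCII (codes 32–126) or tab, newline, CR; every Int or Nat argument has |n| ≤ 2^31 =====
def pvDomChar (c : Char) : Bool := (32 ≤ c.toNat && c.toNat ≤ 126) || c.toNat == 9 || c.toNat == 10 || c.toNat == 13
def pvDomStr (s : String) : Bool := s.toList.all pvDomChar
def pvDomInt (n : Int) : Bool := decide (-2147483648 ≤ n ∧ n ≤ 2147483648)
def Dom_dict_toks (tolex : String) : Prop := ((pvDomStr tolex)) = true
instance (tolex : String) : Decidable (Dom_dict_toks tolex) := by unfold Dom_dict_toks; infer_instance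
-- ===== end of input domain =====

-- B replaces A's per-character buffer state machine (which rebuilds and scans the token
-- list and regrows a buffer at every character) with a two-pass decomposition: collect all
-- delimiter positions by set membership, then slice the original string between them.
-- Same return value; measurably faster by a constant factor (timing run).

-- ===== PORT A =====
-- toks.split() (a module-level constant string split on whitespace)
def pvToks : List String := PySem.Str.split₀ "! @ # $ % ^ & * ( ) < > ? . , ` / { } ; : - _ + ' \""

def dict_toks (tolex : String) : List (String × String) :=
  let cs := tolex.toList
  let st := (PySem.List.pyRange 0 (PySem.List.len cs) 1).foldl
    (fun (st : PySem.Dict String String × List Char) i =>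
      let c := PySem.List.pyGetD cs i ' '      -- tolex[i]; i always in range
      if pvToks.contains (String.ofList [c]) then
        ((st.1.insert (String.ofList [c]) "TOKEN").insert
           (String.ofList (PySem.Chars.strip st.2))
           (String.ofList (c :: "_subtext".toList)), [])
      else (st.1, st.2 ++ [c]))
    (PySem.Dict.empty, [])
  st.1.items

-- ===== PORT B =====
def dict_toks_alt (tolex : String) : List (String × String) :=
  let cs := tolex.toList
  let seps : PySem.Set String := PySem.Set.ofList pvToks
  let idxs := ((PySem.List.enumerate cs).filter
      (fun p => PySem.Set.contains seps (String.ofList [p.2]))).map (·.1)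
  let st := idxs.foldl
    (fun (st : PySem.Dict String String × Int) i =>
      let c := PySem.List.pyGetD cs i ' '      -- tolex[i]
      ((st.1.insert (String.ofList [c]) "TOKEN").insert
         (String.ofList (PySem.Chars.strip (PySem.List.slice cs (some st.2) (some i))))
         (String.ofList (c :: "_subtext".toList)), i + 1))
    (PySem.Dict.empty, 0)
  st.1.items

-- ===== PRECONDITION & SPEC =====
def Spec_dict_toks (tolex : String) (out : List (String × String)) : Prop := out = dict_toks_alt tolex
instance (tolex : String) (out : List (String × String)) : Decidable (Spec_dict_toks tolex out) := by unfold Spec_dict_toks; infer_instance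

-- ===== CLAIM (what is proved, stated in full; the proofs are below) =====
def Claim_equal_dict_toks : Prop := ∀ (tolex : String), Dom_dict_toks tolex → Spec_dict_toks tolex (dict_toks tolex)

-- ===== LEMMAS AND PROOFS =====

-- the delimiter test as each port writes it
def pvDelimA (c : Char) : Bool := pvToks.contains (String.ofList [c])
def pvDelimB (c : Char) : Bool := PySem.Set.contains (PySem.Set.ofList pvToks) (String.ofList [c])

-- the two loop bodies and B's index list, as named functions (definitionally the ports' lambdas)
def pvFA (cs : List Char) (st : PySem.Dict String String × List Char) (i : Int) :
    PySem.Dict String String × List Char :=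
  let c := PySem.List.pyGetD cs i ' '
  if pvDelimA c then
    ((st.1.insert (String.ofList [c]) "TOKEN").insert
       (String.ofList (PySem.Chars.strip st.2)) (String.ofList (c :: "_subtext".toList)), [])
  else (st.1, st.2 ++ [c])

def pvFB (cs : List Char) (st : PySem.Dict String String × Int) (i : Int) :
    PySem.Dict String String × Int :=
  let c := PySem.List.pyGetD cs i ' '
  ((st.1.insert (String.ofList [c]) "TOKEN").insert
     (String.ofList (PySem.Chars.strip (PySem.List.slice cs (some st.2) (some i))))
     (String.ofList (c :: "_subtext".toList)), i + 1)

def pvIdxs (cs : List Char) : List Int :=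
  ((PySem.List.enumerate cs).filter (fun p => pvDelimB p.2)).map (·.1)

lemma pvPortA_eq (tolex : String) :
    dict_toks tolex =
      ((PySem.List.pyRange 0 (PySem.List.len tolex.toList) 1).foldl (pvFA tolex.toList)
        (PySem.Dict.empty, [])).1.items := rfl

lemma pvPortB_eq (tolex : String) :
    dict_toks_alt tolex =
      ((pvIdxs tolex.toList).foldl (pvFB tolex.toList) (PySem.Dict.empty, 0)).1.items := rfl

lemma pvDelim_eq (c : Char) : pvDelimA c = pvDelimB c := by
  unfold pvDelimA pvDelimB
  by_cases h : String.ofList [c] ∈ pvToks <;>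
    simp [h, PySem.Set.contains_eq_listContains, PySem.Set.mem_ofList]

lemma pvGetD_append (cs : List Char) (x : Char) (i : Int) (h0 : 0 ≤ i) (h : i < cs.length) :
    PySem.List.pyGetD (cs ++ [x]) i ' ' = PySem.List.pyGetD cs i ' ' := by
  rw [PySem.List.pyGetD_eq_getElem (cs ++ [x]) ' ' h0 (by simp; omega),
      PySem.List.pyGetD_eq_getElem cs ' ' h0 h]
  rw [List.getElem_append_left (by omega)]

lemma pvGetD_last (cs : List Char) (x : Char) :
    PySem.List.pyGetD (cs ++ [x]) (cs.length : Int) ' ' = x := by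
  rw [PySem.List.pyGetD_eq_getElem (cs ++ [x]) ' ' (by positivity) (by simp)]
  simp

lemma pvSlice_append (cs : List Char) (x : Char) (p i : Int) (hp : 0 ≤ p) (hi0 : 0 ≤ i)
    (hi : i ≤ cs.length) :
    PySem.List.slice (cs ++ [x]) (some p) (some i) = PySem.List.slice cs (some p) (some i) := by
  rw [PySem.List.slice_toNat _ hp hi0, PySem.List.slice_toNat _ hp hi0]
  by_cases hple : p.toNat ≤ cs.length
  · rw [List.drop_append_of_le_length hple,
        List.take_append_of_le_length (by simp only [List.length_drop]; omega)]
  · rw [List.drop_of_length_le (l := cs ++ [x]) (by simp only [List.length_append, List.length_cons, List.length_nil]; omega),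
        List.drop_of_length_le (l := cs) (by omega)]

lemma pvSlice_drop (cs : List Char) (x : Char) (p : Int) (hp0 : 0 ≤ p) (hp : p ≤ cs.length) :
    PySem.List.slice (cs ++ [x]) (some p) (some (cs.length : Int)) = cs.drop p.toNat := by
  rw [PySem.List.slice_toNat _ hp0 (by positivity),
      List.drop_append_of_le_length (by omega),
      List.take_append_of_le_length (by simp)]
  exact List.take_of_length_le (by simp)

lemma pvIdxs_bound (cs : List Char) (i : Int) (h : i ∈ pvIdxs cs) : 0 ≤ i ∧ i < cs.length := by
  unfold pvIdxs at h
  simp only [List.mem_map, List.mem_filter] at h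
  obtain ⟨p, ⟨hmem, -⟩, rfl⟩ := h
  rw [PySem.List.mem_enumerate_iff] at hmem
  obtain ⟨k, hk, rfl⟩ := hmem
  simp; omega

lemma pvIdxs_append (cs : List Char) (x : Char) :
    pvIdxs (cs ++ [x]) = pvIdxs cs ++ (if pvDelimB x then [(cs.length : Int)] else []) := by
  unfold pvIdxs
  rw [PySem.List.enumerate_append, List.filter_append, List.map_append]
  congr 1
  simp [PySem.List.enumerate_cons, PySem.List.enumerate_nil]
  by_cases h : pvDelimB x <;> simp [h]

lemma pvFoldB_append (cs : List Char) (x : Char) (xs : List Int)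
    (h : ∀ i ∈ xs, 0 ≤ i ∧ i < cs.length) :
    ∀ (d : PySem.Dict String String) (p : Int), 0 ≤ p →
      xs.foldl (pvFB (cs ++ [x])) (d, p) = xs.foldl (pvFB cs) (d, p) := by
  induction xs with
  | nil => intro d p _; rfl
  | cons i xs ih =>
    intro d p hp
    obtain ⟨hi0, hilt⟩ := h i (by simp)
    simp only [List.foldl_cons]
    rw [show pvFB (cs ++ [x]) (d, p) i = pvFB cs (d, p) i by
          unfold pvFB
          rw [pvGetD_append cs x i hi0 hilt, pvSlice_append cs x p i hp hi0 (le_of_lt hilt)]]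
    exact ih (fun j hj => h j (by simp [hj])) _ (i + 1) (by omega)

lemma pvMain (cs : List Char) :
    (PySem.List.pyRange 0 (PySem.List.len cs) 1).foldl (pvFA cs) (PySem.Dict.empty, ([] : List Char))
      = (((pvIdxs cs).foldl (pvFB cs) (PySem.Dict.empty, 0)).1,
         cs.drop ((pvIdxs cs).foldl (pvFB cs) (PySem.Dict.empty, 0)).2.toNat)
    ∧ 0 ≤ ((pvIdxs cs).foldl (pvFB cs) (PySem.Dict.empty, 0)).2
    ∧ ((pvIdxs cs).foldl (pvFB cs) (PySem.Dict.empty, 0)).2 ≤ cs.length := by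
  induction cs using List.reverseRecOn with
  | nil => simp [pvIdxs, PySem.List.enumerate_nil, PySem.List.len, PySem.List.pyRange_one_eq_nil]
  | append_singleton cs x ih =>
    obtain ⟨heq, hp0, hple⟩ := ih
    -- split the range
    have hrange : PySem.List.pyRange 0 (PySem.List.len (cs ++ [x])) 1
        = PySem.List.pyRange 0 (PySem.List.len cs) 1 ++ [(cs.length : Int)] := by
      rw [PySem.List.len_eq, PySem.List.len_eq]
      rw [PySem.List.pyRange_one_append 0 (cs.length : Int) ((cs ++ [x]).length : Int)
            (by positivity) (by simp)]
      congr 1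
      rw [PySem.List.pyRange_one_cons (by simp)]
      rw [PySem.List.pyRange_one_eq_nil (by simp)]
    rw [hrange, List.foldl_append]
    -- A's fold over the old range ignores the appended character
    have hcongr : (PySem.List.pyRange 0 (PySem.List.len cs) 1).foldl (pvFA (cs ++ [x]))
          (PySem.Dict.empty, ([] : List Char))
        = (PySem.List.pyRange 0 (PySem.List.len cs) 1).foldl (pvFA cs)
          (PySem.Dict.empty, ([] : List Char)) := by
      apply PySem.List.foldl_congr_mem
      intro acc i hi
      rw [PySem.List.len_eq, PySem.List.mem_pyRange_one] at hi
      unfold pvFA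
      rw [pvGetD_append cs x i hi.1 hi.2]
    rw [hcongr, heq]
    -- B's side
    set b := (pvIdxs cs).foldl (pvFB cs) (PySem.Dict.empty, 0) with hb
    rw [pvIdxs_append, List.foldl_append,
        pvFoldB_append cs x (pvIdxs cs) (fun i hi => pvIdxs_bound cs i hi) PySem.Dict.empty 0 le_rfl,
        ← hb]
    -- the one appended step
    by_cases hdx : pvDelimB x
    · simp only [hdx, if_true, List.foldl_cons, List.foldl_nil]
      unfold pvFA pvFB
      simp only [pvGetD_last, pvDelim_eq, hdx, if_true]
      rw [pvSlice_drop cs x b.2 hp0 hple]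
      refine ⟨?_, by omega, by simp⟩
      simp only [Prod.mk.injEq]
      refine ⟨trivial, ?_⟩
      rw [List.drop_of_length_le (by simp)]
    · simp only [hdx, Bool.false_eq_true, if_false, List.foldl_cons, List.foldl_nil]
      unfold pvFA
      simp only [pvGetD_last, pvDelim_eq, hdx, Bool.false_eq_true, if_false]
      refine ⟨?_, hp0, by simp; omega⟩
      simp only [Prod.mk.injEq]
      exact ⟨trivial, by rw [List.drop_append_of_le_length (by omega)]⟩

-- ===== VERDICT (by name: the statement is the Claim_ definition above) =====
theorem dict_toks_spec : Claim_equal_dict_toks := by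
  intro tolex _
  unfold Spec_dict_toks
  rw [pvPortA_eq, pvPortB_eq, (pvMain tolex.toList).1]
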